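-- pv_equiv track=rewrite | github.com/hth810/pythonlc | 周赛/灵/移除相邻字符后字典序最小的字符串.py | lexicographicallySmallestString
-- ===== SOURCE A (Python) =====
-- from functools import cache
--
-- def check(x,y):
--     d=abs(ord(x)-ord(y))
--     return d==1 or d==25
--
-- def lexicographicallySmallestString(s: str) -> str:
--     n=len(s)
--     @cache
--     def emp(i,j):
--         if i>j:
--             return True
--         if check(s[i],s[j]) and emp(i+1,j-1):
--             return True
--         for k in range(i+1,j-1,2):
--             if emp(i,k) and emp(k+1,j):
--                 return True
--         return False
--
--     @cache
--     def dfs(i):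
--         if i==n:
--             return ''
--         res=s[i]+dfs(i+1)
--         for j in range(i+1,n,2):
--             if emp(i,j):
--                 res=min(res,dfs(j+1))
--         return res
--     return dfs(0)
-- ===== SOURCE B (Python) =====
-- def check(x, y):
--     d = abs(ord(x) - ord(y))
--     return d == 1 or d == 25
--
-- def lexicographicallySmallestString(s: str) -> str:
--     n = len(s)
--     emp = {}
--
--     def E(i, j):
--         return i > j or emp.get((i, j), False)
--
--     for j in range(n):
--         for i in range(j, -1, -1):
--             ok = check(s[i], s[j]) and E(i + 1, j - 1)
--             if not ok:
--                 for k in range(i + 1, j - 1, 2):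
--                     if E(i, k) and E(k + 1, j):
--                         ok = True
--                         break
--             emp[(i, j)] = ok
--
--     best = [''] * (n + 1)
--     for i in range(n - 1, -1, -1):
--         res = s[i] + best[i + 1]
--         for j in range(i + 1, n, 2):
--             if E(i, j) and best[j + 1] < res:
--                 res = best[j + 1]
--         best[i] = res
--     return best[0]
-- ===== Notes on version B (the rewrite author's own statement) =====
-- stated objective: alternative
-- what changed: Replaced the two @cache-memoized recursions (emp over intervals, dfs over suffixes) by explicit bottom-up tabulation: a dict-backed table of emp values filled column by column, then an array best[] filled right to left, returning best[0].
import Mathlib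
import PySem

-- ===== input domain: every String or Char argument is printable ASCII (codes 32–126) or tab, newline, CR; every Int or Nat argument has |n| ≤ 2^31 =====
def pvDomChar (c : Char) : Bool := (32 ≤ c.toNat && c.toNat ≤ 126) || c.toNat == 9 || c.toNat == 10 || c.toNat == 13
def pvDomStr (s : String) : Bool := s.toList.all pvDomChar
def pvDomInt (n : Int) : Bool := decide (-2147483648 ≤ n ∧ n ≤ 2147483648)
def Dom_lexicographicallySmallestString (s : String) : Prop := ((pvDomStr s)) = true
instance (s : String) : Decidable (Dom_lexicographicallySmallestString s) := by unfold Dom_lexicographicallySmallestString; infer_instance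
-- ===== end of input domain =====

-- B replaces A's memoized top-down recursions by bottom-up tabulation (same asymptotic cost); equivalence of the returned string is proved.

-- ===== PORT A =====
-- shared helper: Python check(x, y)
def pvCheck (x y : Char) : Bool :=
  let d := ((x.toNat : Int) - (y.toNat : Int)).natAbs
  d == 1 || d == 25

-- shared helper: Python '<' on strings, over List Char
def pvStrLt : List Char → List Char → Bool
  | [], [] => false
  | [], _ :: _ => true
  | _ :: _, [] => false
  | a :: as, b :: bs => if a < b then true else if b < a then false else pvStrLt as bs

-- length of range(i+1, j-1, 2) (Nat arithmetic; exact for the reachable calls, where i ≤ j)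
def pvCnt (i j : Nat) : Nat := ((j - 1) - (i + 1) + 1) / 2
-- length of range(i+1, n, 2)
def pvCntD (i n : Nat) : Nat := (n - (i + 1) + 1) / 2

-- bounds for members of the emp split loop (used for termination of empA)
theorem pvMemKs {i j k : Nat} (h : k ∈ List.range' (i + 1) (pvCnt i j) 2) :
    i + 1 ≤ k ∧ k + 2 ≤ j := by
  rw [List.mem_range'] at h
  obtain ⟨m, hm, rfl⟩ := h
  unfold pvCnt at hm
  omega

-- bounds for members of the dfs loop (used for termination of dfsA)
theorem pvMemJs {i n j : Nat} (h : j ∈ List.range' (i + 1) (pvCntD i n) 2) :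
    i + 1 ≤ j ∧ j + 1 ≤ n := by
  rw [List.mem_range'] at h
  obtain ⟨m, hm, rfl⟩ := h
  unfold pvCntD at hm
  omega

-- Python emp(i, j) (memoized recursion; Nat indices — the clamped j-1 at j=0 lands in the i>j base case exactly like Python's -1)
def empA (l : List Char) (i j : Nat) : Bool :=
  if i > j then true
  else
    (pvCheck (l.getD i ' ') (l.getD j ' ') && empA l (i + 1) (j - 1))
      || (List.range' (i + 1) (pvCnt i j) 2).attach.any
          (fun x => empA l i x.1 && empA l (x.1 + 1) j)
termination_by (j + 1) - i
decreasing_by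
  all_goals (try have := pvMemKs x.2); omega

-- Python dfs(i)
def dfsA (l : List Char) (n i : Nat) : List Char :=
  if n ≤ i then []
  else
    (List.range' (i + 1) (pvCntD i n) 2).attach.foldl
      (fun res x =>
        if empA l i x.1 then
          (if pvStrLt (dfsA l n (x.1 + 1)) res then dfsA l n (x.1 + 1) else res)
        else res)
      (l.getD i ' ' :: dfsA l n (i + 1))
termination_by n - i
decreasing_by
  all_goals (try have := pvMemJs x.2); omega

def lexicographicallySmallestString (s : String) : String :=
  String.mk (dfsA s.toList s.toList.length 0)

-- ===== PORT B =====
-- Python helper E(i, j) over the emp dict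
def pvE (emp : PySem.Dict (Nat × Nat) Bool) (i j : Nat) : Bool :=
  decide (j < i) || emp.getD (i, j) false

-- one inner-loop body: compute and store emp[(i, j)]
def pvFillCell (l : List Char) (emp : PySem.Dict (Nat × Nat) Bool) (j i : Nat) :
    PySem.Dict (Nat × Nat) Bool :=
  let ok := pvCheck (l.getD i ' ') (l.getD j ' ') && pvE emp (i + 1) (j - 1)
  let ok2 := if ok then ok
    else (List.range' (i + 1) (pvCnt i j) 2).any (fun k => pvE emp i k && pvE emp (k + 1) j)
  emp.insert (i, j) ok2

-- the two nested for-loops building the emp table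
def pvEmpTable (l : List Char) (n : Nat) : PySem.Dict (Nat × Nat) Bool :=
  (List.range n).foldl
    (fun emp j => ((List.range (j + 1)).reverse).foldl (fun e i => pvFillCell l e j i) emp)
    (PySem.Dict.mk [])

-- one iteration of the best[] loop
def pvBestStep (l : List Char) (n : Nat) (emp : PySem.Dict (Nat × Nat) Bool)
    (best : List (List Char)) (i : Nat) : List (List Char) :=
  let res0 := l.getD i ' ' :: best.getD (i + 1) []
  let res := (List.range' (i + 1) (pvCntD i n) 2).foldl
    (fun res j =>
      if pvE emp i j && pvStrLt (best.getD (j + 1) []) res then best.getD (j + 1) [] else res)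
    res0
  best.set i res

def pvBest (l : List Char) (n : Nat) (emp : PySem.Dict (Nat × Nat) Bool) : List (List Char) :=
  ((List.range n).reverse).foldl (pvBestStep l n emp) (List.replicate (n + 1) [])

def lexicographicallySmallestString_alt (s : String) : String :=
  String.mk ((pvBest s.toList s.toList.length (pvEmpTable s.toList s.toList.length)).getD 0 [])

-- ===== PRECONDITION & SPEC =====
def Spec_lexicographicallySmallestString (s : String) (out : String) : Prop := out = lexicographicallySmallestString_alt s
instance (s : String) (out : String) : Decidable (Spec_lexicographicallySmallestString s out) := by unfold Spec_lexicographicallySmallestString; infer_instance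

-- ===== CLAIM (what is proved, stated in full; the proofs are below) =====
def Claim_equal_lexicographicallySmallestString : Prop := ∀ (s : String), Dom_lexicographicallySmallestString s → Spec_lexicographicallySmallestString s (lexicographicallySmallestString s)

-- ===== LEMMAS AND PROOFS =====

-- the emp dict agrees with empA on every key (a, b), a ≤ b < J
def pvDoneTo (l : List Char) (emp : PySem.Dict (Nat × Nat) Bool) (J : Nat) : Prop :=
  ∀ a b : Nat, a ≤ b → b < J → emp.getD (a, b) false = empA l a b

-- column j is done from row i0 upward
def pvDoneCol (l : List Char) (emp : PySem.Dict (Nat × Nat) Bool) (j i0 : Nat) : Prop :=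
  ∀ a : Nat, i0 ≤ a → a ≤ j → emp.getD (a, j) false = empA l a j

theorem pvE_eq {l : List Char} {emp : PySem.Dict (Nat × Nat) Bool} {J : Nat}
    (h : pvDoneTo l emp J) {a b : Nat} (hb : b < J) : pvE emp a b = empA l a b := by
  by_cases hab : b < a
  · rw [empA]
    simp [pvE, hab]
  · have : emp.getD (a, b) false = empA l a b := h a b (by omega) hb
    simp [pvE, hab, this]

theorem pvE_eq_col {l : List Char} {emp : PySem.Dict (Nat × Nat) Bool} {j i0 : Nat}
    (h : pvDoneCol l emp j i0) {a : Nat} (ha : i0 ≤ a) (haj : a ≤ j) :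
    pvE emp a j = empA l a j := by
  have : emp.getD (a, j) false = empA l a j := h a ha haj
  simp [pvE, Nat.not_lt.mpr haj, this]

theorem pvE_base {l : List Char} {emp : PySem.Dict (Nat × Nat) Bool} {a b : Nat}
    (hab : b < a) : pvE emp a b = empA l a b := by
  rw [empA]; simp [pvE, hab]

-- fold over attach equals plain fold when the body ignores the proof
theorem pvFoldAttach {α β : Type} (xs : List α) (f : β → {x // x ∈ xs} → β) (g : β → α → β)
    (h : ∀ (b : β) (x : α) (hx : x ∈ xs), f b ⟨x, hx⟩ = g b x) (b : β) :
    xs.attach.foldl f b = xs.foldl g b := by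
  have h1 : xs.attach.foldl f b = xs.attach.foldl (fun acc x => g acc x.1) b := by
    apply PySem.List.foldl_congr_mem
    intro acc x _
    obtain ⟨v, hv⟩ := x
    exact h acc v hv
  rw [h1, List.foldl_attach]

theorem pvAnyAttach {α : Type} (xs : List α) (f : {x // x ∈ xs} → Bool) (g : α → Bool)
    (h : ∀ (x : α) (hx : x ∈ xs), f ⟨x, hx⟩ = g x) :
    xs.attach.any f = xs.any g := by
  rw [Bool.eq_iff_iff]
  simp only [List.any_eq_true, List.mem_attach]
  constructor
  · rintro ⟨⟨v, hv⟩, -, hf⟩; exact ⟨v, hv, by rw [← h v hv]; exact hf⟩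
  · rintro ⟨v, hv, hg⟩; exact ⟨⟨v, hv⟩, by simp, by rw [h v hv]; exact hg⟩

theorem pvFillCell_getD_self (l : List Char) (emp : PySem.Dict (Nat × Nat) Bool) (j i : Nat) :
    (pvFillCell l emp j i).getD (i, j) false =
      ((pvCheck (l.getD i ' ') (l.getD j ' ') && pvE emp (i + 1) (j - 1))
        || (List.range' (i + 1) (pvCnt i j) 2).any (fun k => pvE emp i k && pvE emp (k + 1) j)) := by
  simp only [pvFillCell]
  rw [PySem.Dict.getD_insert, if_pos rfl]
  cases pvCheck (l.getD i ' ') (l.getD j ' ') && pvE emp (i + 1) (j - 1) <;> simp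

theorem pvFillCell_getD_ne (l : List Char) (emp : PySem.Dict (Nat × Nat) Bool) (j i : Nat)
    (a b : Nat) (hne : (a, b) ≠ (i, j)) :
    (pvFillCell l emp j i).getD (a, b) false = emp.getD (a, b) false := by
  simp only [pvFillCell]
  rw [PySem.Dict.getD_insert, if_neg hne]

theorem pvFillCell_correct (l : List Char) (j i : Nat) (hij : i ≤ j)
    (emp : PySem.Dict (Nat × Nat) Bool)
    (hTo : pvDoneTo l emp j) (hCol : pvDoneCol l emp j (i + 1)) :
    pvDoneTo l (pvFillCell l emp j i) j ∧ pvDoneCol l (pvFillCell l emp j i) j i := by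
  have hE1 : pvE emp (i + 1) (j - 1) = empA l (i + 1) (j - 1) := by
    by_cases hj : j - 1 < i + 1
    · exact pvE_base hj
    · exact pvE_eq hTo (by omega)
  have hAny : (List.range' (i + 1) (pvCnt i j) 2).any (fun k => pvE emp i k && pvE emp (k + 1) j)
      = (List.range' (i + 1) (pvCnt i j) 2).attach.any
          (fun x => empA l i x.1 && empA l (x.1 + 1) j) := by
    refine (pvAnyAttach _ _ _ ?_).symm
    intro k hk
    have hb := pvMemKs hk
    rw [pvE_eq hTo (by omega), pvE_eq_col hCol (by omega) (by omega)]
  have hval : (pvFillCell l emp j i).getD (i, j) false = empA l i j := by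
    rw [pvFillCell_getD_self, hE1, hAny]
    conv_rhs => rw [empA]
    rw [if_neg (by omega)]
  constructor
  · intro a b hab hb
    rw [pvFillCell_getD_ne l emp j i a b (by simp only [ne_eq, Prod.mk.injEq]; omega)]
    exact hTo a b hab hb
  · intro a ha haj
    by_cases hai : a = i
    · subst hai; exact hval
    · rw [pvFillCell_getD_ne l emp j i a j (by simp only [ne_eq, Prod.mk.injEq]; omega)]
      exact hCol a (by omega) haj

theorem pvFillCol (l : List Char) (j : Nat) :
    ∀ (i0 : Nat), i0 ≤ j + 1 → ∀ emp, pvDoneTo l emp j → pvDoneCol l emp j i0 →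
      pvDoneTo l (((List.range i0).reverse).foldl (fun e i => pvFillCell l e j i) emp) (j + 1) := by
  intro i0
  induction i0 with
  | zero =>
    intro _ emp hTo hCol
    simp only [List.range_zero, List.reverse_nil, List.foldl_nil]
    intro a b hab hb
    by_cases hbj : b < j
    · exact hTo a b hab hbj
    · have : b = j := by omega
      subst this
      exact hCol a (Nat.zero_le a) hab
  | succ i0 ih =>
    intro hle emp hTo hCol
    rw [List.range_succ, List.reverse_append]
    simp only [List.reverse_cons, List.reverse_nil, List.nil_append, List.cons_append,
      List.foldl_cons]
    have hc := pvFillCell_correct l j i0 (by omega) emp hTo hCol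
    exact ih (by omega) _ hc.1 hc.2

theorem pvTable (l : List Char) (n : Nat) : pvDoneTo l (pvEmpTable l n) n := by
  unfold pvEmpTable
  induction n with
  | zero => intro a b _ hb; omega
  | succ J ih =>
    rw [List.range_succ, List.foldl_append, List.foldl_cons, List.foldl_nil]
    apply pvFillCol l J (J + 1) (le_refl _)
    · exact ih
    · intro a ha haj; omega

theorem pvGetDSetSelf (l : List (List Char)) (i : Nat) (v : List Char) (h : i < l.length) :
    (l.set i v).getD i [] = v := by
  simp [List.getD_eq_getElem?_getD, h]

theorem pvGetDSetNe (l : List (List Char)) (i m : Nat) (v : List Char) (h : i ≠ m) :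
    (l.set i v).getD m [] = l.getD m [] := by
  simp [List.getD_eq_getElem?_getD, h]

-- best[] invariant
def pvBestInv (l : List Char) (n : Nat) (best : List (List Char)) (i0 : Nat) : Prop :=
  best.length = n + 1 ∧ ∀ m : Nat, i0 ≤ m → m ≤ n → best.getD m [] = dfsA l n m

theorem pvBestStep_correct (l : List Char) (n : Nat) (emp : PySem.Dict (Nat × Nat) Bool)
    (hemp : pvDoneTo l emp n) (best : List (List Char)) (i : Nat) (hi : i < n)
    (hInv : pvBestInv l n best (i + 1)) :
    pvBestInv l n (pvBestStep l n emp best i) i := by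
  obtain ⟨hlen, hval⟩ := hInv
  have hres : (List.range' (i + 1) (pvCntD i n) 2).foldl
      (fun res j =>
        if pvE emp i j && pvStrLt (best.getD (j + 1) []) res then best.getD (j + 1) [] else res)
      (l.getD i ' ' :: best.getD (i + 1) []) = dfsA l n i := by
    conv_rhs => rw [dfsA]
    rw [if_neg (by omega)]
    rw [pvFoldAttach _ _
      (fun res j =>
        if empA l i j then
          (if pvStrLt (dfsA l n (j + 1)) res then dfsA l n (j + 1) else res)
        else res) (fun b x hx => rfl)]
    · rw [hval (i + 1) (le_refl _) (by omega)]
      apply PySem.List.foldl_congr_mem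
      intro acc j hj
      have hb := pvMemJs hj
      rw [pvE_eq hemp (by omega), hval (j + 1) (by omega) (by omega)]
      cases empA l i j <;> cases pvStrLt (dfsA l n (j + 1)) acc <;> simp
  constructor
  · simp [pvBestStep, hlen]
  · intro m hm hmn
    by_cases hmi : m = i
    · subst hmi
      simp only [pvBestStep]
      rw [pvGetDSetSelf _ _ _ (by omega)]
      exact hres
    · simp only [pvBestStep]
      rw [pvGetDSetNe _ _ _ _ (by omega)]
      exact hval m (by omega) hmn

theorem pvBestFold (l : List Char) (n : Nat) (emp : PySem.Dict (Nat × Nat) Bool)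
    (hemp : pvDoneTo l emp n) :
    ∀ (i0 : Nat), i0 ≤ n → ∀ best, pvBestInv l n best i0 →
      pvBestInv l n (((List.range i0).reverse).foldl (pvBestStep l n emp) best) 0 := by
  intro i0
  induction i0 with
  | zero =>
    intro _ best hInv
    simpa using hInv
  | succ i0 ih =>
    intro hle best hInv
    rw [List.range_succ, List.reverse_append]
    simp only [List.reverse_cons, List.reverse_nil, List.nil_append, List.cons_append,
      List.foldl_cons]
    exact ih (by omega) _ (pvBestStep_correct l n emp hemp best i0 (by omega) hInv)

theorem pvBest_eq (l : List Char) (n : Nat) :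
    (pvBest l n (pvEmpTable l n)).getD 0 [] = dfsA l n 0 := by
  have hInit : pvBestInv l n (List.replicate (n + 1) []) n := by
    constructor
    · simp
    · intro m hm hmn
      have : m = n := by omega
      subst this
      rw [dfsA, if_pos (le_refl _)]
      simp
  have := pvBestFold l n (pvEmpTable l n) (pvTable l n) n (le_refl _) _ hInit
  exact this.2 0 (le_refl _) (Nat.zero_le n)

-- ===== VERDICT (by name: the statement is the Claim_ definition above) =====
theorem lexicographicallySmallestString_spec : Claim_equal_lexicographicallySmallestString := by
  intro s _
  unfold Spec_lexicographicallySmallestString lexicographicallySmallestString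
    lexicographicallySmallestString_alt
  exact (pvBest_eq s.toList s.toList.length).symm ▸ rfl
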